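-- pv_equiv track=rewrite | github.com/miliar/Code_Jam_Webscraper | solutions_python/solutions_year13_round0_nr2/551.py | solve
-- ===== SOURCE A (Python) =====
-- def rotate(n, m, lawn):
--     new_lawn = [[None]*n for i in range(m)]
--     for i in range(n):
--         for j in range(m):
--             new_lawn[j][i] = lawn[i][j]
--     return new_lawn
--
-- def solve(n, m, lawn):
--     new_lawn = [[100]*m for i in range(n)]
--     for i in range(2):
--         for (j, row) in enumerate(lawn):
--             h = max(row)
--             new_lawn[j] = [min(h, new_lawn[j][k]) for k in range(m)]
--         lawn = rotate(n, m, lawn)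
--         new_lawn = rotate(n, m, new_lawn)
--         (n, m) = (m, n)
--     return lawn == new_lawn
-- ===== SOURCE B (Python) =====
-- def solve(n, m, lawn):
--     rowmax = [max(row) for row in lawn]
--     colmax = [max(lawn[i][j] for i in range(n)) for j in range(m)]
--     return all(lawn[i][j] == min(rowmax[i], colmax[j], 100)
--                for i in range(n) for j in range(m))
-- ===== Notes on version B (the rewrite author's own statement) =====
-- stated objective: simpler
-- what changed: B drops A's rotate/transpose passes and rebuilt grids entirely: it builds a row-maxima list and a column-maxima list once and checks every cell equals min(rowmax, colmax, 100) directly.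
import Mathlib
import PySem

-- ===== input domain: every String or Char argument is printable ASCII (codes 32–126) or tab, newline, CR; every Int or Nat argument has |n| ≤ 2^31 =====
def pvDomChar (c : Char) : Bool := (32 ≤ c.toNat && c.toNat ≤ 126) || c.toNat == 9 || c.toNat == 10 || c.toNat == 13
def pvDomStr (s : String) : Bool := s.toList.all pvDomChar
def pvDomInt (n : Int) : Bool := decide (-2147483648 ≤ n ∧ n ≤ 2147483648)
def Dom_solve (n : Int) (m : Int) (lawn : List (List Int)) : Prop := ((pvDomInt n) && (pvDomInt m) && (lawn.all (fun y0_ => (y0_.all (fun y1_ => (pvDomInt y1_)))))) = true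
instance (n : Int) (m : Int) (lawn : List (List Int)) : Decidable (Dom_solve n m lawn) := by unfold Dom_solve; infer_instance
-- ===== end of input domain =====

-- B replaces A's rotate/transpose passes and rebuilt grids by two max tables (row maxima, column
-- maxima) and one direct cell check lawn[i][j] == min(rowmax[i], colmax[j], 100).

-- ===== PORT A =====
-- Python's [[None]*n …] placeholder is ported as 0: on admitted inputs every cell is written
-- before the grid is compared, so the placeholder is never observed; new_lawn[j][i] = … is
-- List.set (indices are in range on admitted inputs).
def rotatePort (n : Int) (m : Int) (lawn : List (List Int)) : List (List Int) :=
  let new_lawn := (PySem.List.pyRange 0 m 1).map (fun _ => (PySem.List.pyRange 0 n 1).map (fun _ => (0 : Int)))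
  (PySem.List.pyRange 0 n 1).foldl (fun nl i =>
    (PySem.List.pyRange 0 m 1).foldl (fun nl2 j =>
      nl2.set j.toNat ((PySem.List.pyGetD nl2 j []).set i.toNat
        (PySem.List.pyGetD (PySem.List.pyGetD lawn i []) j 0))) nl) new_lawn

-- max(row) raises ValueError on an empty row: Pre_solve excludes empty rows, so the .getD 0
-- fallback is never the Python value on admitted inputs; new_lawn[j] = … is List.set.
def solve (n : Int) (m : Int) (lawn : List (List Int)) : Bool :=
  let new_lawn := (PySem.List.pyRange 0 n 1).map (fun _ => (PySem.List.pyRange 0 m 1).map (fun _ => (100 : Int)))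
  let st := (PySem.List.pyRange 0 2 1).foldl
    (fun (st : Int × Int × List (List Int) × List (List Int)) _ =>
      let n := st.1
      let m := st.2.1
      let lawn := st.2.2.1
      let nl0 := st.2.2.2
      let nl := (PySem.List.enumerate lawn 0).foldl (fun nl jr =>
          nl.set jr.1.toNat ((PySem.List.pyRange 0 m 1).map (fun k =>
            min ((PySem.List.max? jr.2 (fun x => x)).getD 0)
              (PySem.List.pyGetD (PySem.List.pyGetD nl jr.1 []) k 0)))) nl0
      (m, n, rotatePort n m lawn, rotatePort n m nl))
    (n, m, lawn, new_lawn)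
  decide (st.2.2.1 = st.2.2.2)

-- ===== PORT B =====
def solve_alt (n : Int) (m : Int) (lawn : List (List Int)) : Bool :=
  let rowmax := lawn.map (fun row => (PySem.List.max? row (fun x => x)).getD 0)
  let colmax := (PySem.List.pyRange 0 m 1).map (fun j =>
      (PySem.List.max? ((PySem.List.pyRange 0 n 1).map (fun i =>
        PySem.List.pyGetD (PySem.List.pyGetD lawn i []) j 0)) (fun x => x)).getD 0)
  (PySem.List.pyRange 0 n 1).all (fun i => (PySem.List.pyRange 0 m 1).all (fun j =>
    PySem.List.pyGetD (PySem.List.pyGetD lawn i []) j 0 ==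
      min (min (PySem.List.pyGetD rowmax i 0) (PySem.List.pyGetD colmax j 0)) 100))

-- ===== PRECONDITION & SPEC =====
-- Pre_solve is exactly where the Python A returns normally: an empty row makes max(row) raise
-- ValueError; with m > 0 the grid must be exactly n rows (n > 0) of length ≥ m, else IndexError
-- or ValueError; with m ≤ 0 it must have at most max(n,0) rows, else new_lawn[j] raises.
def Pre_solve (n : Int) (m : Int) (lawn : List (List Int)) : Prop :=
  (∀ row ∈ lawn, row ≠ [] ∧ m ≤ (row.length : Int)) ∧
  (0 < m → (lawn.length : Int) = n ∧ 0 < n) ∧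
  (m ≤ 0 → ((lawn.length : Int) ≤ n ∨ lawn = []))
instance (n : Int) (m : Int) (lawn : List (List Int)) : Decidable (Pre_solve n m lawn) := by
  unfold Pre_solve; infer_instance

def pvWitness_solve : Int × Int × List (List Int) := (2, 2, [[1, 2], [2, 2]])

def Spec_solve (n : Int) (m : Int) (lawn : List (List Int)) (out : Bool) : Prop := out = solve_alt n m lawn
instance (n : Int) (m : Int) (lawn : List (List Int)) (out : Bool) : Decidable (Spec_solve n m lawn out) := by unfold Spec_solve; infer_instance

-- ===== CLAIM (what is proved, stated in full; the proofs are below) =====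
def Claim_equal_solve : Prop := ∀ (n : Int) (m : Int) (lawn : List (List Int)), Dom_solve n m lawn → Pre_solve n m lawn → Spec_solve n m lawn (solve n m lawn)

-- ===== LEMMAS AND PROOFS =====

def pvG (lw : List (List Int)) (i j : Int) : Int :=
  PySem.List.pyGetD (PySem.List.pyGetD lw i []) j 0

def pvNTab (N M : Nat) (F : Nat → Nat → Int) : List (List Int) :=
  (List.range N).map (fun p => (List.range M).map (F p))

-- a fold that sets index k to a function of the current entry at k, for k = 0,…,N-1
theorem foldl_set_read {α : Type} (N : Nat) (g : Nat → α → α) (d : α) (r : List α) :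
    (((List.range N).foldl (fun acc k => acc.set k (g k (acc.getD k d))) r).length = r.length) ∧
    (∀ p : Nat, ((List.range N).foldl (fun acc k => acc.set k (g k (acc.getD k d))) r)[p]? =
      if p < N then (r[p]?.map (g p)) else r[p]?) := by
  induction N with
  | zero => simp
  | succ N ih =>
    rw [List.range_succ]
    simp only [List.foldl_append, List.foldl_cons, List.foldl_nil]
    obtain ⟨ihl, ihp⟩ := ih
    refine ⟨by rw [List.length_set]; exact ihl, fun p => ?_⟩
    rw [List.getElem?_set, ihl]
    by_cases hpN : N = p
    · have hresN : (List.foldl (fun acc k => acc.set k (g k (acc.getD k d))) r (List.range N)).getD N d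
          = r.getD N d := by
        rw [List.getD_eq_getElem?_getD, List.getD_eq_getElem?_getD, ihp N, if_neg (lt_irrefl N)]
      rw [if_pos hpN, hresN, ← hpN, if_pos (Nat.lt_succ_self N)]
      by_cases hlen : N < r.length
      · rw [if_pos hlen, List.getD_eq_getElem?_getD, List.getElem?_eq_getElem hlen]
        rfl
      · rw [if_neg hlen, List.getElem?_eq_none (by omega)]
        rfl
    · rw [if_neg hpN, ihp p]
      by_cases h1 : p < N
      · rw [if_pos h1, if_pos (by omega)]
      · rw [if_neg h1, if_neg (by omega)]

theorem foldl_pyRange_toRange {α : Type} (m : Int) (F : α → Int → α) (init : α) :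
    (PySem.List.pyRange 0 m 1).foldl F init
      = (List.range m.toNat).foldl (fun a (k : Nat) => F a ((k : Int))) init := by
  rw [PySem.List.pyRange_one, List.foldl_map]
  simp only [zero_add, sub_zero]

theorem map_pyRange_toRange {α : Type} (m : Int) (f : Int → α) :
    (PySem.List.pyRange 0 m 1).map f = (List.range m.toNat).map (fun (k : Nat) => f ((k : Int))) := by
  rw [PySem.List.pyRange_one, List.map_map]
  simp only [zero_add, sub_zero]
  rfl

theorem all_pyRange_toRange (m : Int) (f : Int → Bool) :
    (PySem.List.pyRange 0 m 1).all f = (List.range m.toNat).all (fun (k : Nat) => f ((k : Int))) := by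
  rw [PySem.List.pyRange_one, List.all_map]
  simp only [zero_add, sub_zero]
  rfl

theorem pyGetD_map_range {α : Type} (N : Nat) (g : Nat → α) (k : Nat) (d : α) (hk : k < N) :
    PySem.List.pyGetD ((List.range N).map g) (k : Int) d = g k := by
  rw [PySem.List.pyGetD_natCast, List.getD_eq_getElem?_getD, List.getElem?_map, List.getElem?_range hk]
  rfl

theorem pvG_NTab (N M : Nat) (F : Nat → Nat → Int) (q p : Nat) (hq : q < N) (hp : p < M) :
    pvG (pvNTab N M F) (q : Int) (p : Int) = F q p := by
  unfold pvG pvNTab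
  have h1 : PySem.List.pyGetD ((List.range N).map (fun p => (List.range M).map (F p))) (q : Int) []
      = (List.range M).map (F q) := pyGetD_map_range N _ q [] hq
  rw [h1, pyGetD_map_range M (F q) p 0 hp]

theorem NTab_getD (N M : Nat) (F : Nat → Nat → Int) (p : Nat) (hp : p < N) :
    (pvNTab N M F).getD p [] = (List.range M).map (F p) := by
  unfold pvNTab
  rw [List.getD_eq_getElem?_getD, List.getElem?_map, List.getElem?_range hp]
  rfl

theorem NTab_length (N M : Nat) (F : Nat → Nat → Int) : (pvNTab N M F).length = N := by
  unfold pvNTab; simp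

theorem NTab_congr (N M : Nat) (F G : Nat → Nat → Int)
    (h : ∀ p < N, ∀ q < M, F p q = G p q) : pvNTab N M F = pvNTab N M G := by
  unfold pvNTab
  apply List.map_congr_left
  intro p hp
  apply List.map_congr_left
  intro q hq
  exact h p (List.mem_range.mp hp) q (List.mem_range.mp hq)

theorem NTab_eq_iff (N M : Nat) (F G : Nat → Nat → Int) :
    (pvNTab N M F = pvNTab N M G) ↔ ∀ p < N, ∀ q < M, F p q = G p q := by
  constructor
  · intro h p hp q hq
    have h1 := List.map_inj_left.mp h p (List.mem_range.mpr hp)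
    exact List.map_inj_left.mp h1 q (List.mem_range.mpr hq)
  · exact NTab_congr N M F G

-- the 'for (j, row) in enumerate(lawn): new_lawn[j] = [min(h, new_lawn[j][k]) for k in range(m)]' pass
theorem pass_char (mm : Int) (lawn nl : List (List Int)) :
    (((PySem.List.enumerate lawn 0).foldl (fun nl jr =>
      nl.set jr.1.toNat ((PySem.List.pyRange 0 mm 1).map (fun k =>
        min ((PySem.List.max? jr.2 (fun x => x)).getD 0)
          (PySem.List.pyGetD (PySem.List.pyGetD nl jr.1 []) k 0)))) nl).length = nl.length) ∧
    (∀ p : Nat, ((PySem.List.enumerate lawn 0).foldl (fun nl jr =>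
      nl.set jr.1.toNat ((PySem.List.pyRange 0 mm 1).map (fun k =>
        min ((PySem.List.max? jr.2 (fun x => x)).getD 0)
          (PySem.List.pyGetD (PySem.List.pyGetD nl jr.1 []) k 0)))) nl)[p]? =
      if p < lawn.length then nl[p]?.map (fun r => (PySem.List.pyRange 0 mm 1).map (fun k =>
        min ((PySem.List.max? (lawn.getD p []) (fun x => x)).getD 0)
          (PySem.List.pyGetD r k 0))) else nl[p]?) := by
  rw [PySem.List.enumerate_eq_map_pyRange lawn ([] : List Int), List.foldl_map, foldl_pyRange_toRange]
  simp only [PySem.List.len_eq, Int.toNat_natCast, PySem.List.pyGetD_natCast]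
  exact foldl_set_read lawn.length
    (fun (k : Nat) (r : List Int) => (PySem.List.pyRange 0 mm 1).map (fun kk =>
      min ((PySem.List.max? (lawn.getD k []) (fun x => x)).getD 0)
        (PySem.List.pyGetD r kk 0))) ([] : List Int) nl


-- a fold whose every step rewrites row p to (gg i p row), for all rows p < N = length
theorem foldl_outer_char (l : List Int) (gg : Int → Nat → List Int → List Int)
    (N : Nat) :
    ∀ (nl : List (List Int)), nl.length = N →
    ((l.foldl (fun acc i =>
        (List.range N).foldl (fun acc2 kj => acc2.set kj (gg i kj (acc2.getD kj []))) acc) nl).length = N) ∧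
    (∀ p : Nat, (l.foldl (fun acc i =>
        (List.range N).foldl (fun acc2 kj => acc2.set kj (gg i kj (acc2.getD kj []))) acc) nl)[p]? =
      nl[p]?.map (fun row => l.foldl (fun r i => gg i p r) row)) := by
  induction l with
  | nil =>
    intro nl hlen
    constructor
    · simpa using hlen
    · intro p; simp
  | cons i t ih =>
    intro nl hlen
    have step := foldl_set_read N (fun kj r => gg i kj r) ([] : List Int) nl
    have hstep_len : ((List.range N).foldl (fun acc2 kj => acc2.set kj (gg i kj (acc2.getD kj []))) nl).length = N := by
      rw [step.1, hlen]
    have hstep_pt : ∀ p : Nat, ((List.range N).foldl (fun acc2 kj => acc2.set kj (gg i kj (acc2.getD kj []))) nl)[p]? =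
        nl[p]?.map (gg i p) := by
      intro p
      rw [step.2 p]
      by_cases h : p < N
      · rw [if_pos h]
      · rw [if_neg h, List.getElem?_eq_none (by omega)]
        rfl
    obtain ⟨ihl, ihp⟩ := ih _ hstep_len
    refine ⟨by simpa using ihl, fun p => ?_⟩
    simp only [List.foldl_cons]
    rw [ihp p, hstep_pt p, Option.map_map]
    rfl

theorem rotatePort_eq (n m : Int) (lawn : List (List Int)) :
    rotatePort n m lawn = pvNTab m.toNat n.toNat (fun p q => pvG lawn (q : Int) (p : Int)) := by
  unfold rotatePort
  have hbody : (fun (nl : List (List Int)) (i : Int) =>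
      (PySem.List.pyRange 0 m 1).foldl (fun nl2 j =>
        nl2.set j.toNat ((PySem.List.pyGetD nl2 j []).set i.toNat
          (PySem.List.pyGetD (PySem.List.pyGetD lawn i []) j 0))) nl)
      = (fun (nl : List (List Int)) (i : Int) =>
      (List.range m.toNat).foldl (fun nl2 kj =>
        nl2.set kj ((fun kj r => r.set i.toNat (pvG lawn i (kj : Int))) kj (nl2.getD kj []))) nl) := by
    funext nl i
    rw [foldl_pyRange_toRange]
    simp only [Int.toNat_natCast, PySem.List.pyGetD_natCast, pvG]
  rw [hbody]
  have hinit : ((PySem.List.pyRange 0 m 1).map (fun _ => (PySem.List.pyRange 0 n 1).map (fun _ => (0 : Int)))).length = m.toNat := by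
    rw [List.length_map, PySem.List.length_pyRange_one]
    simp
  have char := foldl_outer_char (PySem.List.pyRange 0 n 1)
      (fun i kj r => r.set i.toNat (pvG lawn i (kj : Int))) m.toNat _ hinit
  apply List.ext_getElem?
  intro p
  rw [char.2 p]
  by_cases hp : p < m.toNat
  · unfold pvNTab
    rw [map_pyRange_toRange]
    simp only [List.getElem?_map, List.getElem?_range, hp, Option.map_some, Option.some.injEq]
    rw [foldl_pyRange_toRange]
    have rowchar := foldl_set_read n.toNat (fun k (_ : Int) => pvG lawn (k : Int) (p : Int)) (0 : Int)
        ((PySem.List.pyRange 0 n 1).map (fun _ => (0 : Int)))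
    have hrowlen : ((PySem.List.pyRange 0 n 1).map (fun _ => (0 : Int))).length = n.toNat := by
      rw [List.length_map, PySem.List.length_pyRange_one]; simp
    have : (List.range n.toNat).foldl (fun (r : List Int) (ki : Nat) => r.set ((ki : Int)).toNat (pvG lawn (ki : Int) (p : Int)))
          ((PySem.List.pyRange 0 n 1).map (fun _ => (0 : Int)))
        = (List.range n.toNat).foldl (fun (r : List Int) (ki : Nat) => r.set ki ((fun k (_ : Int) => pvG lawn (k : Int) (p : Int)) ki (r.getD ki 0)))
          ((PySem.List.pyRange 0 n 1).map (fun _ => (0 : Int))) := by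
      simp only [Int.toNat_natCast]
    rw [this]
    apply List.ext_getElem?
    intro q
    rw [rowchar.2 q]
    by_cases hq : q < n.toNat
    · rw [if_pos hq, map_pyRange_toRange, List.getElem?_map, List.getElem?_range hq, List.getElem?_map, List.getElem?_range hq]
      rfl
    · rw [if_neg hq, List.getElem?_eq_none (by rw [hrowlen]; omega), List.getElem?_eq_none (by simp; omega)]
  · rw [List.getElem?_eq_none (by rw [hinit]; omega)]
    unfold pvNTab
    rw [List.getElem?_eq_none (by simp; omega)]
    rfl

theorem init100 (n m : Int) :
    (PySem.List.pyRange 0 n 1).map (fun _ => (PySem.List.pyRange 0 m 1).map (fun _ => (100 : Int)))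
      = pvNTab n.toNat m.toNat (fun _ _ => (100 : Int)) := by
  unfold pvNTab
  rw [map_pyRange_toRange]
  apply List.map_congr_left
  intro p _
  rw [map_pyRange_toRange]

theorem rot_NTab (n m : Int) (N M : Nat) (w : Nat → Nat → Int)
    (hN : n.toNat = N) (hM : m.toNat = M) :
    rotatePort n m (pvNTab N M w) = pvNTab M N (fun p q => w q p) := by
  rw [rotatePort_eq, hN, hM]
  apply NTab_congr
  intro p hp q hq
  exact pvG_NTab N M w q p hq hp

theorem pass_NTab (mm : Int) (lawn : List (List Int)) (N M : Nat) (w : Nat → Nat → Int)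
    (h1 : lawn.length = N) (h2 : mm.toNat = M) :
    ((PySem.List.enumerate lawn 0).foldl (fun nl jr =>
      nl.set jr.1.toNat ((PySem.List.pyRange 0 mm 1).map (fun k =>
        min ((PySem.List.max? jr.2 (fun x => x)).getD 0)
          (PySem.List.pyGetD (PySem.List.pyGetD nl jr.1 []) k 0)))) (pvNTab N M w))
    = pvNTab N M (fun p k =>
        min ((PySem.List.max? (lawn.getD p []) (fun x => x)).getD 0) (w p k)) := by
  have char := pass_char mm lawn (pvNTab N M w)
  apply List.ext_getElem?
  intro p
  rw [char.2 p]
  by_cases hp : p < N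
  · rw [if_pos (by rw [h1]; exact hp)]
    unfold pvNTab
    simp only [List.getElem?_map, List.getElem?_range, hp, Option.map_some, Option.some.injEq]
    rw [map_pyRange_toRange, h2]
    apply List.map_congr_left
    intro k hk
    congr 1
    exact pyGetD_map_range M (w p) k 0 (List.mem_range.mp hk)
  · rw [if_neg (by rw [h1]; exact hp), List.getElem?_eq_none (by rw [NTab_length]; omega)]
    unfold pvNTab
    rw [List.getElem?_eq_none (by simp; omega)]

theorem pvG_def (lw : List (List Int)) (i j : Int) :
    pvG lw i j = PySem.List.pyGetD (PySem.List.pyGetD lw i []) j 0 := rfl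

theorem pyGetD_map_lt {α β : Type} (f : α → β) (xs : List α) (q : Nat) (d : β) (dd : α)
    (hq : q < xs.length) :
    PySem.List.pyGetD (xs.map f) (q : Int) d = f (xs.getD q dd) := by
  rw [PySem.List.pyGetD_natCast, List.getD_eq_getElem?_getD, List.getElem?_map,
    List.getElem?_eq_getElem hq, List.getD_eq_getElem?_getD, List.getElem?_eq_getElem hq]
  rfl

theorem solve_eq_alt (n m : Int) (lawn : List (List Int))
    (hpre : 0 < m → (lawn.length : Int) = n) : solve n m lawn = solve_alt n m lawn := by
  have h01 : PySem.List.pyRange 0 2 1 = [0, 1] := by decide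
  by_cases hm : 0 < m
  · -- main case: both sides reduce to the cellwise check lawn[i][j] = min(rowmax, colmax, 100)
    have hlen : (lawn.length : Int) = n := hpre hm
    have hL : lawn.length = n.toNat := by omega
    simp only [solve]
    rw [h01]
    simp only [List.foldl_cons, List.foldl_nil]
    rw [Bool.eq_iff_iff, decide_eq_true_iff]
    rw [init100 n m,
      pass_NTab m lawn n.toNat m.toNat (fun _ _ => (100 : Int)) hL rfl,
      rotatePort_eq n m lawn,
      rot_NTab n m n.toNat m.toNat _ rfl rfl,
      pass_NTab n (pvNTab m.toNat n.toNat (fun p q => pvG lawn (q : Int) (p : Int)))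
        m.toNat n.toNat _ (NTab_length m.toNat n.toNat _) rfl,
      rot_NTab m n m.toNat n.toNat _ rfl rfl,
      rot_NTab m n m.toNat n.toNat _ rfl rfl]
    simp only [solve_alt]
    simp only [all_pyRange_toRange]
    rw [NTab_eq_iff]
    simp only [List.all_eq_true, List.mem_range, beq_iff_eq]
    have hrowB : ∀ q : Nat, q < lawn.length →
        PySem.List.pyGetD (lawn.map (fun row => (PySem.List.max? row (fun x => x)).getD 0)) ((q : Nat) : Int) 0
          = (PySem.List.max? (lawn.getD q []) (fun x => x)).getD 0 := by
      intro q hq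
      exact pyGetD_map_lt _ lawn q 0 [] hq
    have hcolB : ∀ p : Nat, p < m.toNat →
        PySem.List.pyGetD ((PySem.List.pyRange 0 m 1).map (fun j =>
            (PySem.List.max? ((PySem.List.pyRange 0 n 1).map (fun i =>
              PySem.List.pyGetD (PySem.List.pyGetD lawn i []) j 0)) (fun x => x)).getD 0)) ((p : Nat) : Int) 0
          = (PySem.List.max? ((pvNTab m.toNat n.toNat (fun p q => pvG lawn (q : Int) (p : Int))).getD p []) (fun x => x)).getD 0 := by
      intro p hp
      rw [map_pyRange_toRange, pyGetD_map_range m.toNat _ p 0 hp, NTab_getD m.toNat n.toNat _ p hp,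
        map_pyRange_toRange]
      simp only [pvG]
    constructor
    · intro H q hq p hp
      rw [hrowB q (by omega), hcolB p hp, ← pvG_def lawn ((q : Nat) : Int) ((p : Nat) : Int)]
      have h := H q hq p hp
      omega
    · intro H p hp q hq
      have h := H p (by omega) q hq
      rw [hrowB p (by omega), hcolB q hq] at h
      rw [pvG_def lawn ((p : Nat) : Int) ((q : Nat) : Int)]
      omega
  · -- m ≤ 0: both grids collapse to empty rows and A compares identical terms
    have hM0 : m.toNat = 0 := by omega
    simp only [solve]
    rw [h01]
    simp only [List.foldl_cons, List.foldl_nil]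
    rw [Bool.eq_iff_iff, decide_eq_true_iff]
    have hNTab0 : ∀ (F : Nat → Nat → Int), pvNTab 0 n.toNat F = [] := by
      intro F; unfold pvNTab; simp
    rw [rotatePort_eq n m lawn, hM0, hNTab0]
    simp only [PySem.List.enumerate_nil, List.foldl_nil]
    rw [rotatePort_eq n m _, hM0, hNTab0]
    simp only [solve_alt]
    have hnil : PySem.List.pyRange 0 m 1 = [] := PySem.List.pyRange_one_eq_nil (by omega)
    rw [hnil]
    simp

-- ===== VERDICT (by name: the statement is the Claim_ definition above) =====
theorem solve_spec : Claim_equal_solve := by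
  intro n m lawn _ hpre
  unfold Spec_solve
  exact solve_eq_alt n m lawn (fun hm => (hpre.2.1 hm).1)
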